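-- pv_equiv track=rewrite | github.com/niclaurio/others | equazionii secondo grado.py | porta_fuori
-- ===== SOURCE A (Python) =====
-- from typing import Tuple
--
-- def porta_fuori(delta:int)-> Tuple[int, int]:
--   '''
--     porta fuori dalla radice delta
--
--     Parameters
--     ----------
--     delta : int
--
--     Returns
--     -------
--     Tuple[int, int]
--         radice:int
--                parte portata fuori dalla radice
--         delta: int
--              parte rimasta sotto radice
--
--     '''
--   radice = 1
--
--   #porto fuori l'eventuale
--   while delta % 4 == 0:
--     delta = int(delta / 4)
--     radice = radice * 2
--
--   #a questo punto se posso portare fuori qualcosa sicuramente sarà una quantità dispari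
--   # affinche sia un divisore il quadrato dovrà essere <= di delta
--   divisore = 3
--   quadrato = 9
--   while quadrato <= delta:
--       #per portare fuori dalla radice devo dividere per il quadrato di un numero
--       #quello che risulterà fuori dalla radice sarà il numero
--     while delta % quadrato == 0:
--       delta = int(delta / quadrato)
--       radice = radice * divisore
--     divisore = divisore + 2
--     quadrato = divisore ** 2
--   return (radice, delta)
-- ===== SOURCE B (Python) =====
-- def porta_fuori(delta):
--     # factor out paired 2's, same 4-division stage as the task needs
--     radice = 1
--     while delta % 4 == 0:
--         delta //= 4
--         radice *= 2
--     # instead of repeatedly dividing delta by squares of every odd divisor,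
--     # scan once (without mutating delta) for the LARGEST odd s with s*s | delta,
--     # then take it out in a single division
--     best = 1
--     s = 3
--     while s * s <= delta:
--         if delta % (s * s) == 0:
--             best = s
--         s += 2
--     return (radice * best, delta // (best * best))
-- ===== Notes on version B (the rewrite author's own statement) =====
-- stated objective: alternative
-- what changed: The odd-factor stage no longer mutates delta in a nested divide-out loop: B scans once for the largest odd s with s*s dividing delta and extracts it with a single division; only the 4-division stage for paired 2's is kept.
import Mathlib
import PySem

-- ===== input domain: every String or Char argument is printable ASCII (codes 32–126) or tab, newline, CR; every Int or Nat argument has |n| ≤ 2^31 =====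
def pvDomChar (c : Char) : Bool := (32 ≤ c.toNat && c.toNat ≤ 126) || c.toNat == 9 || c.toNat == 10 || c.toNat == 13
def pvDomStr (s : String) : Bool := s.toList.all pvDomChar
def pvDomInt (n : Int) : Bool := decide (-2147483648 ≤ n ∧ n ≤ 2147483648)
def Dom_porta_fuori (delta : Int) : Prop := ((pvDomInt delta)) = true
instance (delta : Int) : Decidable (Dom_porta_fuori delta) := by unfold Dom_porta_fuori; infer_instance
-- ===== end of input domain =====

-- B replaces A's nested divide-out loops over odd divisors by a single non-mutating scan for
-- the largest odd s with s*s ∣ delta (objective: alternative algorithm, same cost class).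

-- ===== PORT A =====
-- while delta % 4 == 0: delta = int(delta / 4); radice = radice * 2
-- int(delta/4) is exact under the guard (4 ∣ delta), ported as delta / 4; fuel |delta| bounds
-- the iteration count (the Python loop diverges only at delta = 0, excluded by Pre_).
def pfA_four : Nat → Int → Int → Int × Int
  | 0, delta, radice => (delta, radice)
  | n+1, delta, radice =>
    if delta % 4 == 0 then pfA_four n (delta / 4) (radice * 2) else (delta, radice)

-- inner: while delta % quadrato == 0: delta = int(delta / quadrato); radice = radice * divisore
def pfA_sq : Nat → Int → Int → Int → Int → Int × Int
  | 0, delta, radice, _, _ => (delta, radice)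
  | n+1, delta, radice, quadrato, divisore =>
    if delta % quadrato == 0 then
      pfA_sq n (delta / quadrato) (radice * divisore) quadrato divisore
    else (delta, radice)

-- outer: while quadrato <= delta: (inner); divisore = divisore + 2; quadrato = divisore ** 2
def pfA_main : Nat → Int → Int → Int → Int → Int × Int
  | 0, delta, radice, _, _ => (radice, delta)
  | n+1, delta, radice, divisore, quadrato =>
    if quadrato ≤ delta then
      let p := pfA_sq delta.natAbs delta radice quadrato divisore
      pfA_main n p.1 p.2 (divisore + 2) ((divisore + 2) ^ 2)
    else (radice, delta)

def porta_fuori (delta : Int) : Int × Int :=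
  let p := pfA_four delta.natAbs delta 1
  pfA_main (p.1.natAbs + 1) p.1 p.2 3 9

-- ===== PORT B =====
-- while delta % 4 == 0: delta //= 4; radice *= 2   (same totality fuel as A's port)
def pfB_four : Nat → Int → Int → Int × Int
  | 0, delta, radice => (delta, radice)
  | n+1, delta, radice =>
    if delta % 4 == 0 then pfB_four n (delta / 4) (radice * 2) else (delta, radice)

-- while s * s <= delta: if delta % (s * s) == 0: best = s; s = s + 2
def pfB_scan : Nat → Int → Int → Int → Int
  | 0, _, _, best => best
  | n+1, delta, s, best =>
    if s * s ≤ delta then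
      pfB_scan n delta (s + 2) (if delta % (s * s) == 0 then s else best)
    else best

def porta_fuori_alt (delta : Int) : Int × Int :=
  let p := pfB_four delta.natAbs delta 1
  let best := pfB_scan p.1.natAbs p.1 3 1
  (p.2 * best, p.1 / (best * best))

-- ===== PRECONDITION & SPEC =====
-- Pre_ excludes only delta = 0, on which A's first while loop never terminates (no value is returned).
def Pre_porta_fuori (delta : Int) : Prop := delta ≠ 0
instance (delta : Int) : Decidable (Pre_porta_fuori delta) := by unfold Pre_porta_fuori; infer_instance
def pvWitness_porta_fuori : Int := 48

def Spec_porta_fuori (delta : Int) (out : Int × Int) : Prop := out = porta_fuori_alt delta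
instance (delta : Int) (out : Int × Int) : Decidable (Spec_porta_fuori delta out) := by unfold Spec_porta_fuori; infer_instance

-- ===== CLAIM (what is proved, stated in full; the proofs are below) =====
def Claim_equal_porta_fuori : Prop := ∀ (delta : Int), Dom_porta_fuori delta → Pre_porta_fuori delta → Spec_porta_fuori delta (porta_fuori delta)

-- ===== LEMMAS AND PROOFS =====

-- the two 4-division stages are the same recursion
theorem fourAB (n : Nat) : ∀ (d r : Int), pfB_four n d r = pfA_four n d r := by
  induction n with
  | zero => intro d r; rfl
  | succ n ih => intro d r; simp only [pfA_four, pfB_four, ih]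

-- the 4-division stage keeps the value nonzero and keeps its sign
theorem pfA_four_sign (n : Nat) : ∀ (d r : Int), d ≠ 0 →
    (pfA_four n d r).1 ≠ 0 ∧ ((pfA_four n d r).1 < 0 ↔ d < 0) := by
  induction n with
  | zero => intro d r hd; refine ⟨hd, ?_⟩; exact Iff.rfl
  | succ n ih =>
    intro d r hd
    by_cases h : d % 4 = 0
    · have hdvd : (4:Int) ∣ d := Int.dvd_of_emod_eq_zero h
      have hk : 4 * (d / 4) = d := Int.mul_ediv_cancel' hdvd
      have hk0 : d / 4 ≠ 0 := by intro h0; rw [h0, mul_zero] at hk; exact hd hk.symm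
      have := ih (d / 4) (r * 2) hk0
      simp only [pfA_four, h, beq_self_eq_true, if_true]
      exact ⟨this.1, this.2.trans (by constructor <;> intro hh <;> omega)⟩
    · simp only [pfA_four, beq_iff_eq, h, if_false]
      simp [hd]

theorem lt_two_pow_natAbs (d : Int) (hd : 0 < d) : d < 2 ^ d.natAbs := by
  have h1 : (d.natAbs : Int) = d := Int.natAbs_of_nonneg hd.le
  have h2 : (d.natAbs : Int) < (2:Int) ^ d.natAbs := by
    exact_mod_cast (Nat.lt_two_pow_self (n := d.natAbs))
  omega

-- the scan stops immediately when s*s > delta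
theorem pfB_scan_stop (n : Nat) (d s best : Int) (h : ¬ s * s ≤ d) :
    pfB_scan n d s best = best := by
  cases n with
  | zero => rfl
  | succ n => simp only [pfB_scan, h, if_false]

-- characterisation of A's inner divide-out loop
theorem pfA_sq_char (n : Nat) : ∀ (d r q dv : Int), 0 < d → 2 ≤ q → d < 2 ^ n →
    ∃ (j : Nat) (d' : Int), pfA_sq n d r q dv = (d', r * dv ^ j) ∧ d = q ^ j * d' ∧
      ¬ q ∣ d' ∧ 0 < d' := by
  induction n with
  | zero => intro d r q dv hd hq hlt; exfalso; simp at hlt; omega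
  | succ n ih =>
    intro d r q dv hd hq hlt
    by_cases h : d % q = 0
    · have hdvd : q ∣ d := Int.dvd_of_emod_eq_zero h
      have hk : q * (d / q) = d := Int.mul_ediv_cancel' hdvd
      have hkpos : 0 < d / q := by nlinarith [hk]
      have hklt : d / q < 2 ^ n := by
        have : 2 * (d / q) ≤ q * (d / q) := by nlinarith
        have hp : (2:Int) ^ (n+1) = 2 * 2 ^ n := by ring
        omega
      obtain ⟨j, d', heq, hdec, hnd, hpos⟩ := ih (d / q) (r * dv) q dv hkpos hq hklt
      refine ⟨j + 1, d', ?_, ?_, hnd, hpos⟩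
      · simp only [pfA_sq, h, beq_self_eq_true, if_true, heq]
        congr 1
        ring
      · rw [← hk, hdec]; ring
    · refine ⟨0, d, ?_, by ring, fun hdvd => h (Int.emod_eq_zero_of_dvd hdvd), hd⟩
      simp only [pfA_sq, beq_iff_eq, h, if_false, pow_zero, mul_one]

-- characterisation of A's outer loop: it returns (r·s, m) with s·s·m = d,
-- s odd, and m free of odd square factors
theorem pfA_main_char (n : Nat) : ∀ (d r dv : Int), 0 < d → Odd dv → 3 ≤ dv →
    (∀ k : Int, Odd k → 3 ≤ k → k < dv → ¬ (k * k ∣ d)) → d < 2 * n + dv →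
    ∃ s m : Int, pfA_main n d r dv (dv ^ 2) = (r * s, m) ∧ 0 < s ∧ Odd s ∧ 0 < m ∧
      s * s * m = d ∧ (∀ k : Int, Odd k → 3 ≤ k → ¬ (k * k ∣ m)) := by
  induction n with
  | zero =>
    intro d r dv hd hodd h3 hno hfuel
    refine ⟨1, d, by simp [pfA_main], one_pos, odd_one, hd, by ring, ?_⟩
    intro k hk hk3 hkdvd
    have hle : k * k ≤ d := Int.le_of_dvd hd hkdvd
    have hfuel' : d < dv := by push_cast at hfuel; omega
    exact hno k hk hk3 (by nlinarith) hkdvd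
  | succ n ih =>
    intro d r dv hd hodd h3 hno hfuel
    by_cases hq : dv ^ 2 ≤ d
    · obtain ⟨j, d', heq, hdec, hnd, hpos⟩ :=
        pfA_sq_char d.natAbs d r (dv ^ 2) dv hd (by nlinarith) (lt_two_pow_natAbs d hd)
      have hone : (1:Int) ≤ (dv ^ 2) ^ j := one_le_pow₀ (by nlinarith)
      have hd'le : d' ≤ d := by nlinarith
      have hoddstep : Odd (dv + 2) := by obtain ⟨c, hc⟩ := hodd; exact ⟨c + 1, by omega⟩
      have hno' : ∀ k : Int, Odd k → 3 ≤ k → k < dv + 2 → ¬ (k * k ∣ d') := by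
        intro k hk hk3 hklt hkdvd
        have hkne : k ≠ dv + 1 := by
          intro hkeq; obtain ⟨c, hc⟩ := hk; obtain ⟨c', hc'⟩ := hodd; omega
        by_cases hkdv : k = dv
        · exact hnd (by rw [← hkdv]; rw [pow_two] at *; exact hkdvd)
        · have hd'd : d' ∣ d := Dvd.intro_left _ hdec.symm
          exact hno k hk hk3 (by omega) (hkdvd.trans hd'd)
      obtain ⟨s', m', heq', hs', hodd', hm', hsm', hsf'⟩ :=
        ih d' (r * dv ^ j) (dv + 2) hpos hoddstep (by omega) hno' (by omega)
      refine ⟨dv ^ j * s', m', ?_, ?_, ?_, hm', ?_, hsf'⟩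
      · simp only [pfA_main, hq, if_true, heq, heq']
        congr 1
        ring
      · have : (0:Int) < dv ^ j := pow_pos (by omega) j
        nlinarith
      · exact (hodd.pow).mul hodd'
      · calc dv ^ j * s' * (dv ^ j * s') * m' = (dv ^ 2) ^ j * (s' * s' * m') := by ring
          _ = (dv ^ 2) ^ j * d' := by rw [hsm']
          _ = d := hdec.symm
    · refine ⟨1, d, by simp [pfA_main, hq], one_pos, odd_one, hd, by ring, ?_⟩
      intro k hk hk3 hkdvd
      have hle : k * k ≤ d := Int.le_of_dvd hd hkdvd
      have : k < dv := by nlinarith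
      exact hno k hk hk3 this hkdvd

-- number theory: if s·s·m = n with m free of odd square factors, every odd t with t·t ∣ n divides s
theorem nt_dvd (s m t : Nat) (hs : 0 < s) (hm : 0 < m) (ht : Odd t)
    (hdvd : t * t ∣ s * s * m) (hsf : ∀ k : Nat, Odd k → 3 ≤ k → ¬ (k * k ∣ m)) :
    t ∣ s := by
  have ht0 : t ≠ 0 := by rintro rfl; simp [Nat.odd_iff] at ht
  rw [← Nat.factorization_le_iff_dvd ht0 hs.ne', Finsupp.le_def]
  intro p
  by_cases hp : p.Prime
  · by_cases hp2 : p = 2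
    · subst hp2
      have : ¬ (2 ∣ t) := by rw [Nat.odd_iff] at ht; omega
      simp [Nat.factorization_eq_zero_of_not_dvd this]
    · have hoddp : Odd p := hp.odd_of_ne_two hp2
      have h3p : 3 ≤ p := by have := hp.two_le; omega
      have key : (t * t).factorization ≤ (s * s * m).factorization :=
        (Nat.factorization_le_iff_dvd (mul_ne_zero ht0 ht0)
          (by positivity)).2 hdvd
      have keyp := Finsupp.le_def.1 key p
      rw [Nat.factorization_mul ht0 ht0,
        Nat.factorization_mul (mul_ne_zero hs.ne' hs.ne') hm.ne',
        Nat.factorization_mul hs.ne' hs.ne'] at keyp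
      simp only [Finsupp.add_apply] at keyp
      have hm1 : m.factorization p ≤ 1 := by
        by_contra hcon
        have hpp : p ^ 2 ∣ m :=
          (Nat.Prime.pow_dvd_iff_le_factorization hp hm.ne').2 (by omega)
        exact hsf p hoddp h3p (by rwa [← pow_two])
      omega
  · simp [Nat.factorization_eq_zero_of_not_prime _ hp]

-- the same over ℤ for positive values
theorem nt_dvd_int (s m t : Int) (hs : 0 < s) (hm : 0 < m) (ht : Odd t)
    (hdvd : t * t ∣ s * s * m) (hsf : ∀ k : Int, Odd k → 3 ≤ k → ¬ (k * k ∣ m)) :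
    t ∣ s := by
  rw [← Int.natAbs_dvd_natAbs]
  apply nt_dvd s.natAbs m.natAbs t.natAbs
    (by omega) (by omega) (Int.natAbs_odd.2 ht)
  · have : (t * t).natAbs ∣ (s * s * m).natAbs := Int.natAbs_dvd_natAbs.2 hdvd
    simpa [Int.natAbs_mul] using this
  · intro k hk hk3 hkdvd
    apply hsf (k : Int) (Int.natAbs_odd.1 (by simpa using hk)) (by exact_mod_cast hk3)
    have : ((k * k : Nat) : Int) ∣ (m.natAbs : Int) := Int.natCast_dvd_natCast.2 hkdvd
    rwa [Int.natAbs_of_nonneg hm.le] at this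
    
-- B's scan returns the distinguished odd T that all odd square-candidates divide
theorem pfB_scan_char (n : Nat) : ∀ (d s best T : Int), 0 < d → Odd s → 3 ≤ s →
    Odd T → 0 < T → T * T ∣ d →
    (∀ t : Int, Odd t → 3 ≤ t → t * t ∣ d → t ∣ T) → (T < s → best = T) →
    d < 2 * n + s → pfB_scan n d s best = T := by
  induction n with
  | zero =>
    intro d s best T hd hodds h3 hoddT hT hTdvd hall hinv hfuel
    have hTle : T * T ≤ d := Int.le_of_dvd hd hTdvd
    have hfuel' : d < s := by push_cast at hfuel; omega
    exact hinv (by nlinarith)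
  | succ n ih =>
    intro d s best T hd hodds h3 hoddT hT hTdvd hall hinv hfuel
    by_cases h : s * s ≤ d
    · simp only [pfB_scan, h, if_true]
      apply ih d (s + 2) _ T hd
        (by obtain ⟨c, hc⟩ := hodds; exact ⟨c + 1, by omega⟩) (by omega)
        hoddT hT hTdvd hall ?_ (by omega)
      intro hTlt
      have hTne : T ≠ s + 1 := by
        intro hkeq; obtain ⟨c, hc⟩ := hoddT; obtain ⟨c', hc'⟩ := hodds; omega
      by_cases hTs : T = s
      · have : d % (s * s) = 0 := Int.emod_eq_zero_of_dvd (hTs ▸ hTdvd)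
        simp [this, hTs]
      · have hTlts : T < s := by omega
        have hns : ¬ (s * s ∣ d) := by
          intro hsdvd
          have := Int.le_of_dvd hT (hall s hodds h3 hsdvd)
          omega
        have : ¬ (d % (s * s) = 0) := fun h0 => hns (Int.dvd_of_emod_eq_zero h0)
        simp [this, hinv hTlts]
    · rw [pfB_scan_stop _ _ _ _ h]
      have hTle : T * T ≤ d := Int.le_of_dvd hd hTdvd
      exact hinv (by nlinarith)

-- ===== VERDICT (by name: the statement is the Claim_ definition above) =====
theorem porta_fuori_spec : Claim_equal_porta_fuori := by
  intro delta _ hpre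
  unfold Spec_porta_fuori porta_fuori porta_fuori_alt
  simp only [fourAB]
  set p := pfA_four delta.natAbs delta 1 with hp
  obtain ⟨hne, hsign⟩ := pfA_four_sign delta.natAbs delta 1 hpre
  rw [← hp] at hne hsign
  by_cases hneg : delta < 0
  · -- negative delta: both loops do nothing beyond the 4-division stage
    have hd1 : p.1 < 0 := hsign.2 hneg
    have h9 : ¬ (9:Int) ≤ p.1 := by omega
    have hscan : pfB_scan p.1.natAbs p.1 3 1 = 1 :=
      pfB_scan_stop _ _ _ _ (by omega)
    simp [pfA_main, h9, hscan]
  · -- positive delta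
    have hd1 : 0 < p.1 := by
      rcases lt_trichotomy p.1 0 with h | h | h
      · exact absurd (hsign.1 h) hneg
      · exact absurd h hne
      · exact h
    have h9 : (9:Int) = 3 ^ 2 := by norm_num
    rw [h9]
    obtain ⟨s, m, heq, hs, hodds, hm, hsm, hsf⟩ :=
      pfA_main_char (p.1.natAbs + 1) p.1 p.2 3 hd1 (by decide) (by norm_num)
        (by intro k _ hk3 hklt; omega) (by omega)
    rw [heq]
    have hscan : pfB_scan p.1.natAbs p.1 3 1 = s := by
      apply pfB_scan_char p.1.natAbs p.1 3 1 s hd1 (by decide) (by norm_num) hodds hs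
      · exact ⟨m, by rw [← hsm]⟩
      · intro t ht ht3 htdvd
        exact nt_dvd_int s m t hs hm ht (by rwa [hsm]) hsf
      · intro hlt
        obtain ⟨c, hc⟩ := hodds; omega
      · omega
    rw [hscan]
    have hdiv : p.1 / (s * s) = m := by
      rw [← hsm]
      exact Int.mul_ediv_cancel_left m (by nlinarith)
    rw [hdiv]
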